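-- pv_equiv track=rewrite | github.com/JONAHKYAGABA/SVA-MASTERS-WORK | training/metrics.py | _get_head_indices
-- ===== SOURCE A (Python) =====
-- from typing import Dict, List, Any, Optional
--
-- def _get_head_indices(question_types: List[str]) -> Dict[str, List[int]]:
--     """Map question types to answer heads."""
--     head_indices = {
--         'binary': [],
--         'category': [],
--         'region': [],
--         'severity': [],
--     }
--
--     binary_types = {'is_abnormal', 'is_normal', 'has_finding', 'has_device', 'is_abnormal_region'}
--     category_types = {'describe_finding', 'has_finding', 'what_finding'}
--     region_types = {'where_is_finding', 'describe_region', 'which_region'}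
--     severity_types = {'how_severe'}
--
--     for idx, q_type in enumerate(question_types):
--         if q_type in binary_types:
--             head_indices['binary'].append(idx)
--         if q_type in category_types:
--             head_indices['category'].append(idx)
--         if q_type in region_types:
--             head_indices['region'].append(idx)
--         if q_type in severity_types:
--             head_indices['severity'].append(idx)
--
--     return head_indices
-- ===== SOURCE B (Python) =====
-- def _get_head_indices(question_types):
--     """Map question types to answer heads: build each bucket by its own comprehension pass."""
--     def indices_of(types):
--         return [i for i, q in enumerate(question_types) if q in types]
--     return {
--         'binary': indices_of({'is_abnormal', 'is_normal', 'has_finding', 'has_device', 'is_abnormal_region'}),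
--         'category': indices_of({'describe_finding', 'has_finding', 'what_finding'}),
--         'region': indices_of({'where_is_finding', 'describe_region', 'which_region'}),
--         'severity': indices_of({'how_severe'}),
--     }
-- ===== Notes on version B (the rewrite author's own statement) =====
-- stated objective: simpler
-- what changed: Instead of one stateful pass mutating a dict of four lists with four if-branches per element, B builds each of the four buckets independently as its own filtering comprehension over the enumerated input, with no mutable accumulator at all.
import Mathlib
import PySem

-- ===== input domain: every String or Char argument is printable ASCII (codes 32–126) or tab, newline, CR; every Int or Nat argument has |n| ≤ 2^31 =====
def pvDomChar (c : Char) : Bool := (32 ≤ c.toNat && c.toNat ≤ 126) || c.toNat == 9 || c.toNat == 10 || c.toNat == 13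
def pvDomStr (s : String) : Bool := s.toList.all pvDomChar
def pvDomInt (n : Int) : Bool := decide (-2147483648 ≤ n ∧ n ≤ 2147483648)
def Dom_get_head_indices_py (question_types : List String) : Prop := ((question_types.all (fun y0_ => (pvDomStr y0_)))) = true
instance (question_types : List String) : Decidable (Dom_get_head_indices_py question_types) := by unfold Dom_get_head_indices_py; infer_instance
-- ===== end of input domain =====

-- B builds each of the four buckets by its own independent filtering comprehension instead of A's single stateful pass mutating a dict; same cost, simpler.

-- ===== PORT A =====
def pvInitA : PySem.Dict String (List Int) :=
  PySem.Dict.ofList [("binary", []), ("category", []), ("region", []), ("severity", [])]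
def pvBinaryTypes : PySem.Set String :=
  PySem.Set.ofList ["is_abnormal", "is_normal", "has_finding", "has_device", "is_abnormal_region"]
def pvCategoryTypes : PySem.Set String :=
  PySem.Set.ofList ["describe_finding", "has_finding", "what_finding"]
def pvRegionTypes : PySem.Set String :=
  PySem.Set.ofList ["where_is_finding", "describe_region", "which_region"]
def pvSeverityTypes : PySem.Set String :=
  PySem.Set.ofList ["how_severe"]
-- loop body of A: the four independent if-branches, in order
def pvStepA (d : PySem.Dict String (List Int)) (p : Int × String) : PySem.Dict String (List Int) :=
  let d := if PySem.Set.contains pvBinaryTypes p.2 then d.modify "binary" [] (fun l => l ++ [p.1]) else d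
  let d := if PySem.Set.contains pvCategoryTypes p.2 then d.modify "category" [] (fun l => l ++ [p.1]) else d
  let d := if PySem.Set.contains pvRegionTypes p.2 then d.modify "region" [] (fun l => l ++ [p.1]) else d
  if PySem.Set.contains pvSeverityTypes p.2 then d.modify "severity" [] (fun l => l ++ [p.1]) else d

def get_head_indices_py (question_types : List String) : List (String × List Int) :=
  ((PySem.List.enumerate question_types 0).foldl pvStepA pvInitA).items

-- ===== PORT B =====
-- [i for i, q in enumerate(question_types) if q in types]
def pvIndicesOf (types : PySem.Set String) (question_types : List String) : List Int :=
  ((PySem.List.enumerate question_types 0).filter (fun p => types.contains p.2)).map Prod.fst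

def get_head_indices_py_alt (question_types : List String) : List (String × List Int) :=
  [ ("binary", pvIndicesOf (PySem.Set.ofList ["is_abnormal", "is_normal", "has_finding", "has_device", "is_abnormal_region"]) question_types),
    ("category", pvIndicesOf (PySem.Set.ofList ["describe_finding", "has_finding", "what_finding"]) question_types),
    ("region", pvIndicesOf (PySem.Set.ofList ["where_is_finding", "describe_region", "which_region"]) question_types),
    ("severity", pvIndicesOf (PySem.Set.ofList ["how_severe"]) question_types) ]

-- ===== PRECONDITION & SPEC =====
def Spec_get_head_indices_py (question_types : List String) (out : List (String × List Int)) : Prop := out = get_head_indices_py_alt question_types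
instance (question_types : List String) (out : List (String × List Int)) : Decidable (Spec_get_head_indices_py question_types out) := by unfold Spec_get_head_indices_py; infer_instance

-- ===== CLAIM (what is proved, stated in full; the proofs are below) =====
def Claim_equal_get_head_indices_py : Prop := ∀ (question_types : List String), Dom_get_head_indices_py question_types → Spec_get_head_indices_py question_types (get_head_indices_py question_types)

-- ===== LEMMAS AND PROOFS =====
-- filtered index lists, as B computes them, abbreviated for the invariant
def pvSel (t : PySem.Set String) (l : List (Int × String)) : List Int :=
  (l.filter (fun p => t.contains p.2)).map Prod.fst

lemma pvSel_cons (t : PySem.Set String) (p : Int × String) (l : List (Int × String)) :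
    pvSel t (p :: l) = (if t.contains p.2 then [p.1] else []) ++ pvSel t l := by
  by_cases h : p.2 ∈ t <;> simp [pvSel, h]

-- invariant: folding A's loop body over any pair list from a 4-bucket literal dict appends each bucket's filtered indices
lemma pvFold_invariant (l : List (Int × String)) (b c r s : List Int) :
    (l.foldl pvStepA (PySem.Dict.mk [("binary", b), ("category", c), ("region", r), ("severity", s)])).items
      = [("binary", b ++ pvSel pvBinaryTypes l), ("category", c ++ pvSel pvCategoryTypes l),
         ("region", r ++ pvSel pvRegionTypes l), ("severity", s ++ pvSel pvSeverityTypes l)] := by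
  induction l generalizing b c r s with
  | nil => simp [pvSel]
  | cons p t ih =>
    have hstep : pvStepA (PySem.Dict.mk [("binary", b), ("category", c), ("region", r), ("severity", s)]) p
        = PySem.Dict.mk [("binary", b ++ if pvBinaryTypes.contains p.2 then [p.1] else []),
                         ("category", c ++ if pvCategoryTypes.contains p.2 then [p.1] else []),
                         ("region", r ++ if pvRegionTypes.contains p.2 then [p.1] else []),
                         ("severity", s ++ if pvSeverityTypes.contains p.2 then [p.1] else [])] := by
      by_cases h1 : p.2 ∈ pvBinaryTypes <;>
      by_cases h2 : p.2 ∈ pvCategoryTypes <;>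
      by_cases h3 : p.2 ∈ pvRegionTypes <;>
      by_cases h4 : p.2 ∈ pvSeverityTypes <;>
      simp [pvStepA, PySem.Dict.modify, PySem.Dict.insert, PySem.Dict.getD, PySem.Dict.get?, h1, h2, h3, h4]
    rw [List.foldl_cons, hstep, ih]
    simp [pvSel_cons, List.append_assoc]

-- ===== VERDICT (by name: the statement is the Claim_ definition above) =====
theorem get_head_indices_py_spec : Claim_equal_get_head_indices_py := by
  intro qts _
  unfold Spec_get_head_indices_py get_head_indices_py get_head_indices_py_alt
  have h := pvFold_invariant (PySem.List.enumerate qts 0) [] [] [] []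
  rw [show pvInitA = PySem.Dict.mk [("binary", []), ("category", []), ("region", []), ("severity", [])] from rfl, h]
  simp [pvSel, pvIndicesOf, pvBinaryTypes, pvCategoryTypes, pvRegionTypes, pvSeverityTypes]
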